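-- pv_equiv track=rewrite | github.com/rahulswimmer/scalar_assignments_hw | twooutofthree.py | solve
-- ===== SOURCE A (Python) =====
-- def solve(A, B, C):
--     setB = set(B)
--     setC = set(C)
--
--     arr = []
--
--     for i in A:
--         if i in setB:
--             arr.append(i)
--         elif i in setC:
--             arr.append(i)
--
--     for i in B:
--         if i in setC:
--             arr.append(i)
--
--     return list(sorted(set(arr)))
-- ===== SOURCE B (Python) =====
-- def solve(A, B, C):
--     tally = {}
--     for s in (set(A), set(B), set(C)):
--         for x in s:
--             tally[x] = tally.get(x, 0) + 1
--     return sorted(x for x in tally if tally[x] >= 2)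
-- ===== Notes on version B (the rewrite author's own statement) =====
-- stated objective: alternative
-- what changed: Replaces A's two pairwise membership-scan loops (A against setB/setC, then B against setC) and final set+sort with a single uniform tally: count for each element how many of the three sets it belongs to and sort the elements with tally >= 2.
import Mathlib
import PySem

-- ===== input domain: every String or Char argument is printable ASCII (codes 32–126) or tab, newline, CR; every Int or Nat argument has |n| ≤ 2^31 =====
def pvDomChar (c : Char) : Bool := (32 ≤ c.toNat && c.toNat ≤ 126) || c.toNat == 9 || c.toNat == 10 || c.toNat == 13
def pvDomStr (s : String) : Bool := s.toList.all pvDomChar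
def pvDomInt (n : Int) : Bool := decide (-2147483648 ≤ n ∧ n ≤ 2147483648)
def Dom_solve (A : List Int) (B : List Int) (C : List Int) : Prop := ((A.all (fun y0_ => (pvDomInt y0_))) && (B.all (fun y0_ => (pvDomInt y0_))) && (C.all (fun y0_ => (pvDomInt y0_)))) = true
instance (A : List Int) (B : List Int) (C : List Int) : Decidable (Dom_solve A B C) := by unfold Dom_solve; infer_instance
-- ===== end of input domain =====

-- B replaces A's pairwise intersection loops with one cross-set tally (count how many of the
-- three sets each element lies in, keep tally ≥ 2); alternative decomposition, same cost.

-- ===== PORT A =====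
def solve (A : List Int) (B : List Int) (C : List Int) : List Int :=
  let setB := PySem.Set.ofList B
  let setC := PySem.Set.ofList C
  let arr : List Int := A.foldl (fun arr i =>
    if setB.contains i then arr ++ [i]
    else if setC.contains i then arr ++ [i]
    else arr) []
  let arr := B.foldl (fun arr i =>
    if setC.contains i then arr ++ [i] else arr) arr
  PySem.List.sorted (PySem.Set.ofList arr) (fun x => x) false

-- ===== PORT B =====
def solve_alt (A : List Int) (B : List Int) (C : List Int) : List Int :=
  let tally : PySem.Dict Int Int :=
    [PySem.Set.ofList A, PySem.Set.ofList B, PySem.Set.ofList C].foldl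
      (fun d s => s.foldl (fun d x => d.insert x (d.getD x 0 + 1)) d) PySem.Dict.empty
  PySem.List.sorted ((PySem.Dict.keys tally).filter (fun x => decide (2 ≤ tally.getD x 0)))
    (fun x => x) false

-- ===== PRECONDITION & SPEC =====
def Spec_solve (A : List Int) (B : List Int) (C : List Int) (out : List Int) : Prop := out = solve_alt A B C
instance (A : List Int) (B : List Int) (C : List Int) (out : List Int) : Decidable (Spec_solve A B C out) := by unfold Spec_solve; infer_instance

-- ===== CLAIM (what is proved, stated in full; the proofs are below) =====
def Claim_equal_solve : Prop := ∀ (A : List Int) (B : List Int) (C : List Int), Dom_solve A B C → Spec_solve A B C (solve A B C)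

-- ===== LEMMAS AND PROOFS =====

-- ===== VERDICT (by name: the statement is the Claim_ definition above) =====
theorem solve_spec : Claim_equal_solve := by
  intro A B C _
  unfold Spec_solve solve solve_alt
  simp only [List.foldl_cons, List.foldl_nil]
  have hcongr : List.foldl (fun arr i =>
        if (PySem.Set.ofList B).contains i = true then arr ++ [i]
        else if (PySem.Set.ofList C).contains i = true then arr ++ [i] else arr) [] A
      = List.foldl (fun arr i =>
        if ((PySem.Set.ofList B).contains i || (PySem.Set.ofList C).contains i) = true
        then arr ++ [i] else arr) [] A := by
    apply PySem.List.foldl_congr_mem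
    intro acc i _
    by_cases h1 : i ∈ B <;> by_cases h2 : i ∈ C <;> simp [h1, h2]
  rw [hcongr, PySem.List.foldl_append_if_eq_filter, PySem.List.foldl_append_if_eq_filter]
  have hnodupK : (PySem.Dict.keys ((PySem.Set.ofList C).foldl
      (fun d x => d.insert x (d.getD x 0 + 1)) ((PySem.Set.ofList B).foldl
      (fun d x => d.insert x (d.getD x 0 + 1)) ((PySem.Set.ofList A).foldl
      (fun d x => d.insert x (d.getD x 0 + 1)) (PySem.Dict.empty : PySem.Dict Int Int))))).Nodup := by
    apply PySem.Dict.nodup_keys_foldl_insert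
    apply PySem.Dict.nodup_keys_foldl_insert
    apply PySem.Dict.nodup_keys_foldl_insert
    exact PySem.Dict.nodup_keys_empty
  apply PySem.List.sorted_eq_sorted_of_perm _ _ _ (fun a b h => h)
  rw [List.perm_ext_iff_of_nodup (PySem.Set.nodup_ofList _) (List.Nodup.filter _ hnodupK)]
  intro x
  have hgetD : ∀ v : Int, (((PySem.Set.ofList C).foldl
      (fun d x => d.insert x (d.getD x 0 + 1)) ((PySem.Set.ofList B).foldl
      (fun d x => d.insert x (d.getD x 0 + 1)) ((PySem.Set.ofList A).foldl
      (fun d x => d.insert x (d.getD x 0 + 1)) (PySem.Dict.empty : PySem.Dict Int Int))))).getD v 0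
      = (PySem.Set.ofList A).count v + (PySem.Set.ofList B).count v
        + (PySem.Set.ofList C).count v := by
    intro v
    rw [PySem.Dict.getD_foldl_insert_add_one, PySem.Dict.getD_foldl_insert_add_one,
        PySem.Dict.getD_foldl_insert_add_one]
    simp [PySem.Dict.getD, PySem.Dict.get?, PySem.Dict.empty]
  have hcount : ∀ (l : List Int), (PySem.Set.ofList l).count x = if x ∈ l then 1 else 0 := by
    intro l
    by_cases h : x ∈ l
    · rw [if_pos h]
      exact List.count_eq_one_of_mem (PySem.Set.nodup_ofList l)
        ((PySem.Set.mem_ofList l x).mpr h)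
    · rw [if_neg h]
      exact List.count_eq_zero_of_not_mem (fun hc => h ((PySem.Set.mem_ofList l x).mp hc))
  simp only [List.mem_filter, List.mem_append, PySem.Set.mem_ofList,
    PySem.Dict.keys_foldl_insert, PySem.Set.mem_update, hgetD, hcount,
    PySem.Dict.keys_empty, List.not_mem_nil, false_or, decide_eq_true_eq]
  by_cases hA : x ∈ A <;> by_cases hB : x ∈ B <;> by_cases hC : x ∈ C <;>
    simp [hA, hB, hC]
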